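-- pv_equiv track=rewrite | github.com/desve/netology | netology/4/4.py | get_days_for_visits
-- ===== SOURCE A (Python) =====
-- def date_difference (leave, arrive):
-- 	result = leave - arrive + 1
-- 	return result
--
-- def visit_length (visit):
-- 	return date_difference(visit[1], visit[0])
--
-- def get_days_for_visits(visits):
-- 	days_for_visits = []
-- 	for visit in visits:
-- 	    days_for_visit = 0
-- 	    for past_visit in visits:
-- 	        if visit[0] - schengen_constraint < past_visit[0] < visit[0]:
-- 	            days_for_visit += visit_length(past_visit)
-- 	    days_for_visit += visit_length(visit)
-- 	    days_for_visits.append(days_for_visit)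
-- 	return days_for_visits
--
-- schengen_constraint = 180
-- ===== SOURCE B (Python) =====
-- # Faster exact re-implementation: sort (start, length) pairs by start, build
-- # prefix sums of lengths, and answer each visit's 180-day window with two
-- # hand-written binary searches: O(n log n) instead of A's O(n^2) nested scan.
--
-- def _bisect_left(a, x):
--     lo, hi = 0, len(a)
--     while lo < hi:
--         mid = (lo + hi) // 2
--         if a[mid] < x:
--             lo = mid + 1
--         else:
--             hi = mid
--     return lo
--
-- def _bisect_right(a, x):
--     lo, hi = 0, len(a)
--     while lo < hi:
--         mid = (lo + hi) // 2
--         if x < a[mid]: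
--             hi = mid
--         else:
--             lo = mid + 1
--     return lo
--
-- def get_days_for_visits(visits):
--     pairs = sorted(((v[0], v[1] - v[0] + 1) for v in visits), key=lambda p: p[0])
--     starts = [p[0] for p in pairs]
--     pre = [0]
--     s = 0
--     for _, ln in pairs:
--         s += ln
--         pre.append(s)
--     res = []
--     for arrive, leave in visits:
--         lo = _bisect_right(starts, arrive - 180)
--         hi = _bisect_left(starts, arrive)
--         res.append(pre[hi] - pre[lo] + (leave - arrive + 1))
--     return res
-- ===== Notes on version B (the rewrite author's own statement) =====
-- stated objective: faster
-- what changed: Replaced the quadratic nested scan (for each visit, rescan all visits for starts in the 180-day window) by sort-by-start + prefix sums of lengths + two hand-written binary searches per visit.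
import Mathlib
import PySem

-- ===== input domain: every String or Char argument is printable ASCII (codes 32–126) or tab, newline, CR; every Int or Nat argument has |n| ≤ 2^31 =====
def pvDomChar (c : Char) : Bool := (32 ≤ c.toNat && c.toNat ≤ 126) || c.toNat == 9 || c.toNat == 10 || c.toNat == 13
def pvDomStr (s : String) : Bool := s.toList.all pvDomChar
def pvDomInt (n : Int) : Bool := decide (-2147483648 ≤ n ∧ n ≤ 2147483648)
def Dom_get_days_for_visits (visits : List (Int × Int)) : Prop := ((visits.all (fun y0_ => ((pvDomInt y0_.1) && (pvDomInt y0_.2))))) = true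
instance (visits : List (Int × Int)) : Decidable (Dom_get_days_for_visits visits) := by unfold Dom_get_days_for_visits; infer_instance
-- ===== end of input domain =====

-- B replaces A's quadratic nested scan by sort-by-start + prefix sums + binary search (objective: faster).

-- ===== PORT A =====
def date_difference (leave arrive : Int) : Int := leave - arrive + 1

def visit_length (visit : Int × Int) : Int := date_difference visit.2 visit.1

def schengen_constraint : Int := 180

def get_days_for_visits (visits : List (Int × Int)) : List Int :=
  visits.foldl (fun days_for_visits visit =>
    let days_for_visit :=
      visits.foldl (fun days_for_visit past_visit =>
        if visit.1 - schengen_constraint < past_visit.1 ∧ past_visit.1 < visit.1 then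
          days_for_visit + visit_length past_visit
        else days_for_visit) 0
    days_for_visits ++ [days_for_visit + visit_length visit]) []

-- ===== PORT B =====
-- hand-written binary searches of Source B; a[mid] read with getD (mid is in range while lo < hi ≤ len)
def pvBlLoop (a : List Int) (x : Int) (lo hi : Nat) : Nat :=
  if h : lo < hi then
    let mid := (lo + hi) / 2
    if a.getD mid 0 < x then pvBlLoop a x (mid + 1) hi else pvBlLoop a x lo mid
  else lo
termination_by hi - lo
decreasing_by all_goals omega

def pvBrLoop (a : List Int) (x : Int) (lo hi : Nat) : Nat :=
  if h : lo < hi then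
    let mid := (lo + hi) / 2
    if x < a.getD mid 0 then pvBrLoop a x lo mid else pvBrLoop a x (mid + 1) hi
  else lo
termination_by hi - lo
decreasing_by all_goals omega

def get_days_for_visits_alt (visits : List (Int × Int)) : List Int :=
  let pairs := PySem.List.sorted (visits.map (fun v => (v.1, v.2 - v.1 + 1))) (fun p => p.1) false
  let starts := pairs.map (fun p => p.1)
  -- pre[i] built by the running-sum loop of Source B; pre[hi]/pre[lo] read with getD (both ≤ len pairs, in range)
  let pre := (pairs.foldl (fun st p => (st.1 ++ [st.2 + p.2], st.2 + p.2)) ([(0 : Int)], (0 : Int))).1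
  visits.foldl (fun res v =>
    let lo := pvBrLoop starts (v.1 - 180) 0 starts.length
    let hi := pvBlLoop starts v.1 0 starts.length
    res ++ [pre.getD hi 0 - pre.getD lo 0 + (v.2 - v.1 + 1)]) []

-- ===== PRECONDITION & SPEC =====
def Spec_get_days_for_visits (visits : List (Int × Int)) (out : List Int) : Prop := out = get_days_for_visits_alt visits
instance (visits : List (Int × Int)) (out : List Int) : Decidable (Spec_get_days_for_visits visits out) := by unfold Spec_get_days_for_visits; infer_instance

-- ===== CLAIM (what is proved, stated in full; the proofs are below) =====
def Claim_equal_get_days_for_visits : Prop := ∀ (visits : List (Int × Int)), Dom_get_days_for_visits visits → Spec_get_days_for_visits visits (get_days_for_visits visits)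

-- ===== LEMMAS AND PROOFS =====

-- A's inner loop: conditional accumulation = sum over the filtered list
theorem foldl_ite_add (l : List (Int × Int)) (c : Int × Int → Prop) [DecidablePred c]
    (g : Int × Int → Int) (a : Int) :
    l.foldl (fun d p => if c p then d + g p else d) a
      = a + ((l.filter (fun p => decide (c p))).map g).sum := by
  induction l generalizing a with
  | nil => simp
  | cons h t ih =>
    simp only [List.foldl_cons, List.filter_cons]
    by_cases hc : c h
    · simp [hc, ih, add_assoc]
    · simp [hc, ih]

-- B's prefix-sum loop characterized
theorem foldPre (l : List (Int × Int)) (acc : List Int) (s : Int) :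
    (l.foldl (fun st p => (st.1 ++ [st.2 + p.2], st.2 + p.2)) (acc, s)).1
      = acc ++ (List.range l.length).map (fun i => s + ((l.map (fun p => p.2)).take (i+1)).sum) := by
  induction l generalizing acc s with
  | nil => simp
  | cons h t ih =>
    simp only [List.foldl_cons, List.length_cons, List.range_succ_eq_map, List.map_cons, ih]
    simp [List.map_map, Function.comp, add_assoc, List.append_assoc]

theorem pre_getD (l : List (Int × Int)) (i : Nat) (hi : i ≤ l.length) :
    ((l.foldl (fun st p => (st.1 ++ [st.2 + p.2], st.2 + p.2)) ([(0 : Int)], (0 : Int))).1).getD i 0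
      = ((l.map (fun p => p.2)).take i).sum := by
  rw [foldPre]
  match i with
  | 0 => simp
  | j + 1 =>
    have hj : j < l.length := by omega
    have hlen : j + 1 < ([(0:Int)] ++ (List.range l.length).map
        (fun i => 0 + ((l.map (fun p => p.2)).take (i+1)).sum)).length := by
      simp; omega
    rw [List.getD_eq_getElem _ 0 hlen]
    rw [List.getElem_append_right (by simp)]
    simp [hj]

theorem pvBlLoop_spec (a : List Int) (x : Int) (hs : a.Pairwise (· ≤ ·)) :
    ∀ (lo hi : Nat), lo ≤ hi → hi ≤ a.length →
    (∀ j (h : j < a.length), j < lo → a[j] < x) →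
    (∀ j (h : j < a.length), hi ≤ j → x ≤ a[j]) →
    pvBlLoop a x lo hi ≤ a.length ∧
      (∀ j (h : j < a.length), j < pvBlLoop a x lo hi → a[j] < x) ∧
      (∀ j (h : j < a.length), pvBlLoop a x lo hi ≤ j → x ≤ a[j]) := by
  intro lo hi
  induction hlen : hi - lo using Nat.strong_induction_on generalizing lo hi with
  | _ n ih =>
  intro hlh hhl hbelow habove
  rw [pvBlLoop]
  split
  · rename_i h
    have hmid : (lo + hi) / 2 < hi := by omega
    have hmidlo : lo ≤ (lo + hi) / 2 := by omega
    have hmlen : (lo + hi) / 2 < a.length := by omega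
    simp only [List.getD_eq_getElem a 0 hmlen]
    have hmono := List.pairwise_iff_getElem.mp hs
    split
    · rename_i hlt
      exact ih (hi - ((lo+hi)/2 + 1)) (by omega) _ _ rfl (by omega) hhl
        (fun j hj hjlt => by
          rcases Nat.lt_or_ge j ((lo+hi)/2) with hc | hc
          · exact lt_of_le_of_lt (hmono j ((lo+hi)/2) hj hmlen hc) hlt
          · have : j = (lo+hi)/2 := by omega
            subst this; exact hlt)
        habove
    · rename_i hge
      push Not at hge
      exact ih ((lo+hi)/2 - lo) (by omega) _ _ rfl (by omega) (by omega) hbelow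
        (fun j hj hjge => by
          rcases Nat.eq_or_lt_of_le hjge with hc | hc
          · subst hc; exact hge
          · exact le_trans hge (hmono _ j hmlen hj hc))
  · rename_i h
    have : lo = hi := by omega
    subst this
    exact ⟨by omega, hbelow, habove⟩

theorem pvBrLoop_spec (a : List Int) (x : Int) (hs : a.Pairwise (· ≤ ·)) :
    ∀ (lo hi : Nat), lo ≤ hi → hi ≤ a.length →
    (∀ j (h : j < a.length), j < lo → a[j] ≤ x) →
    (∀ j (h : j < a.length), hi ≤ j → x < a[j]) →
    pvBrLoop a x lo hi ≤ a.length ∧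
      (∀ j (h : j < a.length), j < pvBrLoop a x lo hi → a[j] ≤ x) ∧
      (∀ j (h : j < a.length), pvBrLoop a x lo hi ≤ j → x < a[j]) := by
  intro lo hi
  induction hlen : hi - lo using Nat.strong_induction_on generalizing lo hi with
  | _ n ih =>
  intro hlh hhl hbelow habove
  rw [pvBrLoop]
  split
  · rename_i h
    have hmid : (lo + hi) / 2 < hi := by omega
    have hmidlo : lo ≤ (lo + hi) / 2 := by omega
    have hmlen : (lo + hi) / 2 < a.length := by omega
    simp only [List.getD_eq_getElem a 0 hmlen]
    have hmono := List.pairwise_iff_getElem.mp hs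
    split
    · rename_i hlt
      exact ih ((lo+hi)/2 - lo) (by omega) _ _ rfl (by omega) (by omega) hbelow
        (fun j hj hjge => by
          rcases Nat.eq_or_lt_of_le hjge with hc | hc
          · subst hc; exact hlt
          · exact lt_of_lt_of_le hlt (hmono _ j hmlen hj hc))
    · rename_i hge
      push Not at hge
      exact ih (hi - ((lo+hi)/2 + 1)) (by omega) _ _ rfl (by omega) hhl
        (fun j hj hjlt => by
          rcases Nat.lt_or_ge j ((lo+hi)/2) with hc | hc
          · exact le_trans (hmono j ((lo+hi)/2) hj hmlen hc) hge
          · have : j = (lo+hi)/2 := by omega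
            subst this; exact hge)
        habove
  · rename_i h
    have : lo = hi := by omega
    subst this
    exact ⟨by omega, hbelow, habove⟩

-- window sum on a start-sorted list = difference of two prefix sums located by the binary searches
theorem slice_filter (sp : List (Int × Int)) (a b : Int) (hab : a < b)
    (hs : (sp.map (fun p => p.1)).Pairwise (· ≤ ·)) :
    pvBrLoop (sp.map (fun p => p.1)) a 0 (sp.map (fun p => p.1)).length ≤ sp.length ∧
    pvBlLoop (sp.map (fun p => p.1)) b 0 (sp.map (fun p => p.1)).length ≤ sp.length ∧
    ((sp.filter (fun p => decide (a < p.1 ∧ p.1 < b))).map (fun p => p.2)).sum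
      = ((sp.map (fun p => p.2)).take (pvBlLoop (sp.map (fun p => p.1)) b 0 (sp.map (fun p => p.1)).length)).sum
        - ((sp.map (fun p => p.2)).take (pvBrLoop (sp.map (fun p => p.1)) a 0 (sp.map (fun p => p.1)).length)).sum := by
  set starts := sp.map (fun p => p.1) with hst
  set lo := pvBrLoop starts a 0 starts.length with hlo
  set hi := pvBlLoop starts b 0 starts.length with hhi
  have hn : starts.length = sp.length := by simp [hst]
  obtain ⟨hloLen, hloBelow, hloAbove⟩ :=
    pvBrLoop_spec starts a hs 0 starts.length (Nat.zero_le _) le_rfl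
      (fun j hj h0 => absurd h0 (Nat.not_lt_zero j)) (fun j hj hc => absurd hc (by omega))
  obtain ⟨hhiLen, hhiBelow, hhiAbove⟩ :=
    pvBlLoop_spec starts b hs 0 starts.length (Nat.zero_le _) le_rfl
      (fun j hj h0 => absurd h0 (Nat.not_lt_zero j)) (fun j hj hc => absurd hc (by omega))
  have hstj : ∀ j (h : j < sp.length), starts[j] = (sp[j]).1 := by
    intro j h; simp [hst]
  refine ⟨by omega, by omega, ?_⟩
  have hlohi : lo ≤ hi := by
    by_contra hc
    push Not at hc
    have hhl : hi < starts.length := by omega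
    have h1 : starts[hi] ≤ a := hloBelow hi hhl hc
    have h2 : b ≤ starts[hi] := hhiAbove hi hhl le_rfl
    omega
  have hsplit : sp = sp.take lo ++ ((sp.drop lo).take (hi - lo) ++ sp.drop hi) := by
    rw [show sp.drop hi = (sp.drop lo).drop (hi - lo) by rw [List.drop_drop]; congr 1; omega]
    rw [List.take_append_drop, List.take_append_drop]
  have hone : sp.filter (fun p => decide (a < p.1 ∧ p.1 < b)) = (sp.drop lo).take (hi - lo) := by
    conv_lhs => rw [hsplit]
    rw [List.filter_append, List.filter_append]
    rw [List.filter_eq_nil_iff.mpr ?c1, List.filter_eq_self.mpr ?c2, List.filter_eq_nil_iff.mpr ?c3]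
    · simp
    case c1 =>
      intro p hp
      rw [List.mem_take_iff_getElem] at hp
      obtain ⟨j, hj, rfl⟩ := hp
      have hj1 : j < lo := by omega
      have hj2 : j < sp.length := by omega
      have := hloBelow j (by omega) hj1
      rw [hstj j hj2] at this
      simp only [decide_eq_true_eq]
      omega
    case c2 =>
      intro p hp
      rw [List.mem_take_iff_getElem] at hp
      obtain ⟨j, hj, rfl⟩ := hp
      have hjd : j + lo < sp.length := by
        have := List.length_drop (l := sp) (i := lo)
        omega
      have hij : lo + j < sp.length := by omega
      rw [List.getElem_drop]
      have h1 := hloAbove (lo + j) (by omega) (by omega)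
      have h2 := hhiBelow (lo + j) (by omega) (by omega)
      rw [hstj (lo + j) hij] at h1 h2
      simp only [decide_eq_true_eq]
      omega
    case c3 =>
      intro p hp
      rw [List.mem_drop_iff_getElem] at hp
      obtain ⟨j, hj, rfl⟩ := hp
      have := hhiAbove (hi + j) (by omega) (by omega)
      rw [hstj (hi + j) (by omega)] at this
      simp only [decide_eq_true_eq]
      omega
  rw [hone]
  have htk : (sp.map (fun p => p.2)).take hi
      = (sp.map (fun p => p.2)).take lo ++ (((sp.map (fun p => p.2)).drop lo).take (hi - lo)) := by
    have h := List.take_add (l := sp.map (fun p => p.2)) (i := lo) (j := hi - lo)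
    rwa [show lo + (hi - lo) = hi by omega] at h
  rw [htk, List.sum_append, List.map_take, List.map_drop]
  ring

-- per-visit agreement, then the map
theorem per_visit (visits : List (Int × Int)) (v : Int × Int) :
    (visits.foldl (fun d p => if v.1 - schengen_constraint < p.1 ∧ p.1 < v.1 then d + visit_length p else d) 0)
      + visit_length v
    = (let pairs := PySem.List.sorted (visits.map (fun w => (w.1, w.2 - w.1 + 1))) (fun p => p.1) false
       let starts := pairs.map (fun p => p.1)
       let pre := (pairs.foldl (fun st p => (st.1 ++ [st.2 + p.2], st.2 + p.2)) ([(0 : Int)], (0 : Int))).1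
       pre.getD (pvBlLoop starts v.1 0 starts.length) 0
         - pre.getD (pvBrLoop starts (v.1 - 180) 0 starts.length) 0 + (v.2 - v.1 + 1)) := by
  set pairs := PySem.List.sorted (visits.map (fun w => (w.1, w.2 - w.1 + 1))) (fun p => p.1) false with hpairs
  have hs : (pairs.map (fun p => p.1)).Pairwise (· ≤ ·) :=
    PySem.List.sorted_map_key_pairwise (visits.map (fun w => (w.1, w.2 - w.1 + 1))) (fun p => p.1)
  have hab : v.1 - 180 < v.1 := by omega
  obtain ⟨hloLen, hhiLen, hsum⟩ := slice_filter pairs (v.1 - 180) v.1 hab hs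
  simp only []
  rw [pre_getD pairs _ (by simpa using hhiLen), pre_getD pairs _ (by simpa using hloLen)]
  rw [foldl_ite_add visits (fun p => v.1 - schengen_constraint < p.1 ∧ p.1 < v.1) visit_length 0]
  rw [← hsum]
  -- transport the filtered sum from sorted pairs back to visits
  have hperm : (pairs.filter (fun p => decide (v.1 - 180 < p.1 ∧ p.1 < v.1))).Perm
      ((visits.map (fun w => (w.1, w.2 - w.1 + 1))).filter (fun p => decide (v.1 - 180 < p.1 ∧ p.1 < v.1))) :=
    (PySem.List.sorted_perm _ _ _).filter _
  have hsums : ((pairs.filter (fun p => decide (v.1 - 180 < p.1 ∧ p.1 < v.1))).map (fun p => p.2)).sum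
      = (((visits.map (fun w => (w.1, w.2 - w.1 + 1))).filter
            (fun p => decide (v.1 - 180 < p.1 ∧ p.1 < v.1))).map (fun p => p.2)).sum :=
    (hperm.map _).sum_eq
  rw [hsums, List.filter_map]
  simp only [List.map_map]
  have : ((fun p : Int × Int => decide (v.1 - 180 < p.1 ∧ p.1 < v.1)) ∘ (fun w : Int × Int => (w.1, w.2 - w.1 + 1)))
      = (fun p : Int × Int => decide (v.1 - schengen_constraint < p.1 ∧ p.1 < v.1)) := by
    funext w; simp [schengen_constraint]
  rw [this]
  have hmapeq : ((fun p : Int × Int => p.2) ∘ (fun w : Int × Int => (w.1, w.2 - w.1 + 1)))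
      = visit_length := by
    funext w; simp [visit_length, date_difference]
  rw [hmapeq]
  simp [visit_length, date_difference]

-- ===== VERDICT (by name: the statement is the Claim_ definition above) =====
theorem get_days_for_visits_spec : Claim_equal_get_days_for_visits := by
  intro visits _
  unfold Spec_get_days_for_visits get_days_for_visits get_days_for_visits_alt
  simp only [PySem.List.foldl_append_singleton_eq_map, List.nil_append]
  refine List.map_congr_left (fun v _ => ?_)
  simpa using per_visit visits v
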